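-- pv_equiv track=rewrite | github.com/chang-chih-yao/audio_phase | gen_sv_test.py | auto_add_chosen_path
-- ===== SOURCE A (Python) =====
-- def get_edges_from_path(path):
--     edges = []
--     for idx in range(len(path)-1):
--         edges.append((path[idx], path[idx+1]))
--     return edges
--
-- def auto_add_chosen_path(G, all_path, chosen_path_idx_list, edge_covered_map):
--     for k in edge_covered_map:
--         if edge_covered_map[k] == False:
--             Found = False
--             for idx, path in enumerate(all_path):
--                 if Found:
--                     break
--                 for edge in get_edges_from_path(path):
--                     if edge == k:
--                         chosen_path_idx_list.append(idx)
--                         Found = True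
--                         for edge_check in get_edges_from_path(path):
--                             edge_covered_map.update({edge: True})
--
--     return list(set(chosen_path_idx_list))
-- ===== SOURCE B (Python) =====
-- def auto_add_chosen_path(G, all_path, chosen_path_idx_list, edge_covered_map):
--     # Return-value equivalent to A (A also mutates its list/dict arguments; B does not).
--     # One forward pass over all_path builds the earliest-path index per edge,
--     # then one pass over the map looks each uncovered edge up.
--     first = {}
--     for idx, path in enumerate(all_path):
--         for edge in zip(path, path[1:]):
--             if edge not in first:
--                 first[edge] = idx
--     out = list(chosen_path_idx_list)
--     for edge, covered in edge_covered_map.items():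
--         if covered == False and edge in first:
--             out.append(first[edge])
--     return list(set(out))
-- ===== Notes on version B (the rewrite author's own statement) =====
-- stated objective: faster
-- what changed: Instead of re-scanning every path (rebuilding its edge list) for each uncovered edge, B makes one pass over all_path to build a dict mapping each edge to its earliest path index, then one pass over edge_covered_map looking each uncovered edge up; return value (a deduplicated set of indices) is identical, only A's in-place mutation of its arguments is not reproduced.
import Mathlib
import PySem

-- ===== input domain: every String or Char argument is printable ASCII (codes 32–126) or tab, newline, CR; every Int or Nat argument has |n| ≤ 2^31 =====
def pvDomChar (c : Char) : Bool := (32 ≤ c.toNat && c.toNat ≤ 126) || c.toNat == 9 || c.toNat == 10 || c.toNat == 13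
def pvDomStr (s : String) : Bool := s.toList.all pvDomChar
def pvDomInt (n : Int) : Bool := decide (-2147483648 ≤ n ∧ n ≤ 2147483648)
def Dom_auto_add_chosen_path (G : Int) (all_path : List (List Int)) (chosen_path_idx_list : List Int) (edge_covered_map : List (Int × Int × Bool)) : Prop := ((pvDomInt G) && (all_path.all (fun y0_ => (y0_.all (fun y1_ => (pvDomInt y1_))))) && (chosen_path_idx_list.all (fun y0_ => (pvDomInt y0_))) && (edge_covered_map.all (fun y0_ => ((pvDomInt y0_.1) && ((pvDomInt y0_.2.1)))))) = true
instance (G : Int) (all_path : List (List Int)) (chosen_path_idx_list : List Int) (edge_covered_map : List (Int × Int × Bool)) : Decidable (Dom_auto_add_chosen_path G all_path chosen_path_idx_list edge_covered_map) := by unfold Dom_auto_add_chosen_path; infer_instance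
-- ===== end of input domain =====

-- B replaces A's per-edge rescan of every path by one pass building an earliest-path index
-- per edge (objective: faster). Equivalence is about the RETURN value only: the Python A
-- mutates chosen_path_idx_list and edge_covered_map in place, B does not.

-- ===== PORT A =====
-- The dict argument arrives as an association list; both ports decode it the way Python
-- builds a dict from those pairs (insertion order, later value overwrites).
def pvDecodeMap (edge_covered_map : List (Int × Int × Bool)) : PySem.Dict (Int × Int) Bool :=
  edge_covered_map.foldl (fun d t => d.insert (t.1, t.2.1) t.2.2) PySem.Dict.empty

def get_edges_from_path (path : List Int) : List (Int × Int) :=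
  (PySem.List.pyRange 0 (PySem.List.len path - 1) 1).foldl
    (fun edges idx => edges ++ [(PySem.List.pyGetD path idx 0, PySem.List.pyGetD path (idx + 1) 0)]) []

-- body of 'for edge in get_edges_from_path(path)': append idx, run the (redundant) update loop, set Found
def pvA_edgeStep (k : Int × Int) (i : Int) (path : List Int)
    (s : List Int × PySem.Dict (Int × Int) Bool × Bool) (edge : Int × Int) :
    List Int × PySem.Dict (Int × Int) Bool × Bool :=
  if edge == k then
    (s.1 ++ [i], (get_edges_from_path path).foldl (fun dd _ => dd.insert edge true) s.2.1, true)
  else s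

-- body of 'for idx, path in enumerate(all_path)' with the 'if Found: break' guard
def pvA_pathStep (k : Int × Int)
    (s : List Int × PySem.Dict (Int × Int) Bool × Bool) (ip : Int × List Int) :
    List Int × PySem.Dict (Int × Int) Bool × Bool :=
  if s.2.2 then s
  else (get_edges_from_path ip.2).foldl (pvA_edgeStep k ip.1 ip.2) s

-- body of 'for k in edge_covered_map' (keys are fixed: the loop only overwrites existing keys)
def pvA_keyStep (all_path : List (List Int))
    (s : List Int × PySem.Dict (Int × Int) Bool) (k : Int × Int) :
    List Int × PySem.Dict (Int × Int) Bool :=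
  if s.2.getD k true == false then
    let r := (PySem.List.enumerate all_path 0).foldl (pvA_pathStep k) (s.1, s.2, false)
    (r.1, r.2.1)
  else s

def auto_add_chosen_path (G : Int) (all_path : List (List Int)) (chosen_path_idx_list : List Int) (edge_covered_map : List (Int × Int × Bool)) : List Int :=
  let d := pvDecodeMap edge_covered_map
  let r := d.keys.foldl (pvA_keyStep all_path) (chosen_path_idx_list, d)
  PySem.Set.ofList r.1

-- ===== PORT B =====
-- 'for edge in zip(path, path[1:]): if edge not in first: first[edge] = idx'
def pvB_firstStep (f : PySem.Dict (Int × Int) Int) (ip : Int × List Int) : PySem.Dict (Int × Int) Int :=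
  (ip.2.zip ip.2.tail).foldl (fun f e => if f.contains e then f else f.insert e ip.1) f

def auto_add_chosen_path_alt (G : Int) (all_path : List (List Int)) (chosen_path_idx_list : List Int) (edge_covered_map : List (Int × Int × Bool)) : List Int :=
  let d := pvDecodeMap edge_covered_map
  let first := (PySem.List.enumerate all_path 0).foldl pvB_firstStep PySem.Dict.empty
  let out := d.items.foldl
    (fun out kv => if kv.2 == false && first.contains kv.1 then out ++ [first.getD kv.1 0] else out)
    chosen_path_idx_list
  PySem.Set.ofList out

-- ===== PRECONDITION & SPEC =====
def Spec_auto_add_chosen_path (G : Int) (all_path : List (List Int)) (chosen_path_idx_list : List Int) (edge_covered_map : List (Int × Int × Bool)) (out : List Int) : Prop := out = auto_add_chosen_path_alt G all_path chosen_path_idx_list edge_covered_map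
instance (G : Int) (all_path : List (List Int)) (chosen_path_idx_list : List Int) (edge_covered_map : List (Int × Int × Bool)) (out : List Int) : Decidable (Spec_auto_add_chosen_path G all_path chosen_path_idx_list edge_covered_map out) := by unfold Spec_auto_add_chosen_path; infer_instance

-- ===== CLAIM (what is proved, stated in full; the proofs are below) =====
def Claim_equal_auto_add_chosen_path : Prop := ∀ (G : Int) (all_path : List (List Int)) (chosen_path_idx_list : List Int) (edge_covered_map : List (Int × Int × Bool)), Dom_auto_add_chosen_path G all_path chosen_path_idx_list edge_covered_map → Spec_auto_add_chosen_path G all_path chosen_path_idx_list edge_covered_map (auto_add_chosen_path G all_path chosen_path_idx_list edge_covered_map)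

-- ===== LEMMAS AND PROOFS =====

theorem pvZipAux : ∀ (p : List Int), (List.range (p.length - 1)).map (fun k => (p.getD k 0, p.getD (k+1) 0)) = p.zip p.tail := by
  intro p
  induction p with
  | nil => simp
  | cons a p' ih =>
    cases p' with
    | nil => simp
    | cons b p'' =>
      have ih' : (List.range p''.length).map (fun k => ((b::p'').getD k 0, (b::p'').getD (k+1) 0)) = (b::p'').zip p'' := by
        simpa using ih
      simp only [List.length_cons, Nat.add_sub_cancel, List.tail_cons, List.zip_cons_cons]
      rw [List.range_succ_eq_map, List.map_cons, List.map_map]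
      congr 1

theorem pvEdges_eq_zip (p : List Int) : get_edges_from_path p = p.zip p.tail := by
  unfold get_edges_from_path
  rw [PySem.List.foldl_append_singleton_eq_map, PySem.List.pyRange_one]
  have hm : ((PySem.List.len p) - 1 - 0).toNat = p.length - 1 := by
    simp only [PySem.List.len_eq, sub_zero]; omega
  rw [hm]
  simp only [List.map_map, List.nil_append]
  have hc : ∀ k ∈ List.range (p.length - 1), ((fun idx => (PySem.List.pyGetD p idx 0, PySem.List.pyGetD p (idx + 1) 0)) ∘ fun k : Nat => (0 : Int) + k) k
      = (p.getD k 0, p.getD (k+1) 0) := by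
    intro k _
    have h1 : PySem.List.pyGetD p ((0:Int) + (k:Int)) 0 = p.getD k 0 := by
      rw [zero_add, PySem.List.pyGetD_natCast]
    have h2 : PySem.List.pyGetD p ((0:Int) + (k:Int) + 1) 0 = p.getD (k+1) 0 := by
      rw [zero_add, show ((k:Int)+1) = ((k+1:Nat):Int) from by push_cast; ring, PySem.List.pyGetD_natCast]
    simp only [Function.comp_apply]
    rw [h1, h2]
  rw [List.map_congr_left hc]
  exact pvZipAux p

-- the earliest path (with its enumerate index) whose edge list contains k
def pvFind (all_path : List (List Int)) (k : Int × Int) : Option (Int × List Int) :=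
  (PySem.List.enumerate all_path 0).find? (fun ip => (ip.2.zip ip.2.tail).any (fun e => e == k))

def pvContribA (all_path : List (List Int)) (kv : (Int × Int) × Bool) : List Int :=
  if kv.2 = false then
    match pvFind all_path kv.1 with
    | some ip => ((ip.2.zip ip.2.tail).filter (fun e => e == kv.1)).map (fun _ => ip.1)
    | none => []
  else []

def pvContribB (all_path : List (List Int)) (kv : (Int × Int) × Bool) : List Int :=
  if kv.2 = false then
    match pvFind all_path kv.1 with
    | some ip => [ip.1]
    | none => []
  else []

theorem pvInsLoop (k : Int × Int) (l : List (Int × Int)) (dd : PySem.Dict (Int × Int) Bool) :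
    l.foldl (fun dd _ => dd.insert k true) (dd.insert k true) = dd.insert k true := by
  induction l generalizing dd with
  | nil => rfl
  | cons e l ih =>
    simp only [List.foldl_cons]
    rw [PySem.Dict.insert_insert_self]
    exact ih dd

theorem pvInsLoopFull (k : Int × Int) (l : List (Int × Int)) (dd : PySem.Dict (Int × Int) Bool)
    (h0 : l ≠ []) : l.foldl (fun dd _ => dd.insert k true) dd = dd.insert k true := by
  cases l with
  | nil => exact absurd rfl h0
  | cons e l => simp only [List.foldl_cons]; exact pvInsLoop k l dd

theorem pvEdgeFold (k : Int × Int) (i : Int) (path : List Int)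
    (h0 : get_edges_from_path path ≠ []) :
    ∀ (es : List (Int × Int)) (ch : List Int) (dd : PySem.Dict (Int × Int) Bool) (b : Bool),
      es.foldl (pvA_edgeStep k i path) (ch, dd, b) =
        (ch ++ (es.filter (fun e => e == k)).map (fun _ => i),
         if es.any (fun e => e == k) then dd.insert k true else dd,
         b || es.any (fun e => e == k)) := by
  intro es
  induction es with
  | nil => intro ch dd b; simp
  | cons e es ih =>
    intro ch dd b
    simp only [List.foldl_cons, List.filter_cons, List.any_cons]
    by_cases he : (e == k) = true
    · have hek : e = k := eq_of_beq he
      subst hek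
      have hstep : pvA_edgeStep e i path (ch, dd, b) e =
          (ch ++ [i], dd.insert e true, true) := by
        simp only [pvA_edgeStep, BEq.rfl, if_true]
        rw [pvInsLoopFull e (get_edges_from_path path) dd h0]
      rw [hstep, ih]
      simp only [he, if_true, Bool.true_or, Bool.or_true, List.map_cons]
      refine Prod.ext ?_ (Prod.ext ?_ ?_)
      · simp [List.append_assoc]
      · by_cases ha : (es.any fun x => x == e) = true <;>
          simp [ha, PySem.Dict.insert_insert_self]
      · rfl
    · have he' : (e == k) = false := by simpa using he
      have hstep : pvA_edgeStep k i path (ch, dd, b) e = (ch, dd, b) := by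
        simp [pvA_edgeStep, he']
      rw [hstep, ih]
      simp [he']

theorem pvPathStuck (k : Int × Int) :
    ∀ (pairs : List (Int × List Int)) (s : List Int × PySem.Dict (Int × Int) Bool × Bool),
      s.2.2 = true → pairs.foldl (pvA_pathStep k) s = s := by
  intro pairs
  induction pairs with
  | nil => intro s _; rfl
  | cons ip rest ih =>
    intro s h
    simp only [List.foldl_cons, pvA_pathStep, h, if_true]
    exact ih s h

theorem pvPathFold (k : Int × Int) :
    ∀ (pairs : List (Int × List Int)) (ch : List Int) (dd : PySem.Dict (Int × Int) Bool),
      pairs.foldl (pvA_pathStep k) (ch, dd, false) =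
        (match pairs.find? (fun ip => (get_edges_from_path ip.2).any (fun e => e == k)) with
         | none => (ch, dd, false)
         | some ip => (ch ++ ((get_edges_from_path ip.2).filter (fun e => e == k)).map (fun _ => ip.1),
                       dd.insert k true, true)) := by
  intro pairs
  induction pairs with
  | nil => intro ch dd; rfl
  | cons ip rest ih =>
    intro ch dd
    have hstep : pvA_pathStep k (ch, dd, false) ip =
        (get_edges_from_path ip.2).foldl (pvA_edgeStep k ip.1 ip.2) (ch, dd, false) := by
      simp [pvA_pathStep]
    simp only [List.foldl_cons]
    rw [hstep]
    by_cases hany : ((get_edges_from_path ip.2).any (fun e => e == k)) = true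
    · have h0 : get_edges_from_path ip.2 ≠ [] := by
        intro hnil; rw [hnil] at hany; simp at hany
      rw [pvEdgeFold k ip.1 ip.2 h0 (get_edges_from_path ip.2) ch dd false]
      rw [List.find?_cons_of_pos (p := fun ip : Int × List Int => (get_edges_from_path ip.2).any (fun e => e == k)) hany]
      simp only [hany, if_true, Bool.false_or]
      exact pvPathStuck k rest _ rfl
    · have hany' : ((get_edges_from_path ip.2).any (fun e => e == k)) = false :=
        Bool.eq_false_iff.mpr hany
      rw [List.find?_cons_of_neg (p := fun ip : Int × List Int => (get_edges_from_path ip.2).any (fun e => e == k)) hany]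
      rcases hnil : get_edges_from_path ip.2 with _ | ⟨e0, es0⟩
      · rw [List.foldl_nil]
        exact ih ch dd
      · rw [← hnil]
        have hfil : (get_edges_from_path ip.2).filter (fun e => e == k) = [] :=
          List.filter_eq_nil_iff.mpr (fun a ha => by
            have h2 := (List.any_eq_false.mp hany') a ha
            exact h2)
        have hz : (get_edges_from_path ip.2).foldl (pvA_edgeStep k ip.1 ip.2) (ch, dd, false)
            = (ch, dd, false) := by
          rw [pvEdgeFold k ip.1 ip.2 (by rw [hnil]; exact List.cons_ne_nil e0 es0)
              (get_edges_from_path ip.2) ch dd false]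
          simp [hany', hfil]
        rw [hz]
        exact ih ch dd

theorem pvKeyFold (all_path : List (List Int)) :
    ∀ (l : List ((Int × Int) × Bool)) (ch : List Int) (dd : PySem.Dict (Int × Int) Bool),
      (l.map Prod.fst).Nodup →
      (∀ kv ∈ l, dd.get? kv.1 = some kv.2) →
      ((l.map Prod.fst).foldl (pvA_keyStep all_path) (ch, dd)).1 =
        ch ++ l.flatMap (pvContribA all_path) := by
  intro l
  induction l with
  | nil => intro ch dd _ _; simp
  | cons kv l ih =>
    intro ch dd hnd hvals
    have hget : dd.get? kv.1 = some kv.2 := hvals kv (by simp)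
    have hgetD : dd.getD kv.1 true = kv.2 := by
      rw [PySem.Dict.getD_eq_get?_getD, hget]; rfl
    simp only [List.map_cons, List.foldl_cons, List.flatMap_cons]
    cases hv : kv.2 with
    | true =>
      have : pvA_keyStep all_path (ch, dd) kv.1 = (ch, dd) := by
        simp [pvA_keyStep, hgetD, hv]
      rw [this]
      have hcA : pvContribA all_path kv = [] := by simp [pvContribA, hv]
      rw [hcA, List.nil_append]
      exact ih ch dd (by simpa using hnd.of_cons) (fun kv' h' => hvals kv' (List.mem_cons_of_mem _ h'))
    | false =>
      have hstep : pvA_keyStep all_path (ch, dd) kv.1 =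
          (match pvFind all_path kv.1 with
           | none => (ch, dd)
           | some ip => (ch ++ ((ip.2.zip ip.2.tail).filter (fun e => e == kv.1)).map (fun _ => ip.1),
                         dd.insert kv.1 true)) := by
        simp only [pvA_keyStep, hgetD, hv, BEq.rfl, if_true]
        rw [pvPathFold kv.1 (PySem.List.enumerate all_path 0) ch dd]
        unfold pvFind
        simp only [pvEdges_eq_zip]
        cases (PySem.List.enumerate all_path 0).find? (fun ip => ((ip.2.zip ip.2.tail).any (fun e => e == kv.1))) <;> rfl
      obtain ⟨hmem, hnd'⟩ := List.nodup_cons.mp hnd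
      cases hfind : pvFind all_path kv.1 with
      | none =>
        simp only [hfind] at hstep
        rw [hstep]
        have hcA : pvContribA all_path kv = [] := by simp [pvContribA, hv, hfind]
        rw [hcA, List.nil_append]
        exact ih ch dd hnd' (fun kv' h' => hvals kv' (List.mem_cons_of_mem _ h'))
      | some ip =>
        simp only [hfind] at hstep
        rw [hstep]
        have hvals' : ∀ kv' ∈ l, (dd.insert kv.1 true).get? kv'.1 = some kv'.2 := by
          intro kv' h'
          have hne : kv'.1 ≠ kv.1 := by
            intro heq
            exact hmem (heq ▸ List.mem_map_of_mem h')
          rw [PySem.Dict.get?_insert_of_ne dd true hne]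
          exact hvals kv' (List.mem_cons_of_mem _ h')
        rw [ih _ _ hnd' hvals']
        have hcA : pvContribA all_path kv =
            ((ip.2.zip ip.2.tail).filter (fun e => e == kv.1)).map (fun _ => ip.1) := by
          simp [pvContribA, hv, hfind]
        rw [hcA, List.append_assoc]

theorem pvFirstInner (k : Int × Int) (i : Int) :
    ∀ (es : List (Int × Int)) (f : PySem.Dict (Int × Int) Int),
      (es.foldl (fun f e => if f.contains e then f else f.insert e i) f).get? k =
        if f.contains k then f.get? k
        else (if es.any (fun e => e == k) then some i else f.get? k) := by
  intro es
  induction es with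
  | nil =>
    intro f
    simp only [List.foldl_nil, List.any_nil, Bool.false_eq_true, if_false]
    split <;> rfl
  | cons e es ih =>
    intro f
    simp only [List.foldl_cons, List.any_cons]
    by_cases hc : f.contains e = true
    · rw [if_pos hc, ih f]
      by_cases he : (e == k) = true
      · have hek : e = k := eq_of_beq he
        subst hek
        simp [hc]
      · have he' : (e == k) = false := Bool.eq_false_iff.mpr he
        simp [he']
    · rw [if_neg hc, ih (f.insert e i)]
      have hcf : f.contains e = false := Bool.eq_false_iff.mpr hc
      by_cases he : (e == k) = true
      · have hek : e = k := eq_of_beq he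
        subst hek
        have h1 : (f.insert e i).contains e = true := by
          rw [PySem.Dict.contains_insert]; simp
        have h2 : (f.insert e i).get? e = some i := PySem.Dict.get?_insert_self f e i
        simp [h1, h2, hcf]
      · have hne : k ≠ e := by
          intro h
          exact he (by rw [h]; exact BEq.rfl)
        have hke : (k == e) = false := by simpa using hne
        have h1 : (f.insert e i).contains k = f.contains k := by
          rw [PySem.Dict.contains_insert, hke, Bool.false_or]
        have h2 : (f.insert e i).get? k = f.get? k := PySem.Dict.get?_insert_of_ne f i hne
        have he' : (e == k) = false := Bool.eq_false_iff.mpr he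
        simp [h1, h2, he']

theorem pvFirstMono (k : Int × Int) (v : Int) :
    ∀ (pairs : List (Int × List Int)) (f : PySem.Dict (Int × Int) Int),
      f.get? k = some v → ((pairs.foldl pvB_firstStep f).get? k) = some v := by
  intro pairs
  induction pairs with
  | nil => intro f h; exact h
  | cons ip rest ih =>
    intro f h
    simp only [List.foldl_cons]
    apply ih
    unfold pvB_firstStep
    rw [pvFirstInner k ip.1 (ip.2.zip ip.2.tail) f]
    have hc : f.contains k = true := by
      rw [PySem.Dict.contains_eq_isSome_get?, h]; rfl
    rw [if_pos hc]
    exact h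

theorem pvFirstFold (k : Int × Int) :
    ∀ (pairs : List (Int × List Int)) (f : PySem.Dict (Int × Int) Int), f.get? k = none →
      ((pairs.foldl pvB_firstStep f).get? k) =
        (pairs.find? (fun ip => (ip.2.zip ip.2.tail).any (fun e => e == k))).map (fun ip => ip.1) := by
  intro pairs
  induction pairs with
  | nil => intro f h; simpa using h
  | cons ip rest ih =>
    intro f h
    have hc : f.contains k = false := by
      rw [PySem.Dict.contains_eq_isSome_get?, h]; rfl
    simp only [List.foldl_cons]
    have hstep : (pvB_firstStep f ip).get? k =
        (if (ip.2.zip ip.2.tail).any (fun e => e == k) then some ip.1 else f.get? k) := by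
      unfold pvB_firstStep
      rw [pvFirstInner k ip.1 (ip.2.zip ip.2.tail) f, if_neg (by simp [hc])]
    by_cases hany : ((ip.2.zip ip.2.tail).any (fun e => e == k)) = true
    · rw [List.find?_cons_of_pos (p := fun ip : Int × List Int => (ip.2.zip ip.2.tail).any (fun e => e == k)) hany]
      have hv : (pvB_firstStep f ip).get? k = some ip.1 := by rw [hstep, if_pos hany]
      simpa using pvFirstMono k ip.1 rest _ hv
    · rw [List.find?_cons_of_neg (p := fun ip : Int × List Int => (ip.2.zip ip.2.tail).any (fun e => e == k)) hany]
      apply ih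
      rw [hstep, if_neg hany]
      exact h

theorem pvFirstChar (all_path : List (List Int)) (k : Int × Int) :
    (((PySem.List.enumerate all_path 0).foldl pvB_firstStep PySem.Dict.empty).get? k) =
      (pvFind all_path k).map (fun ip => ip.1) :=
  pvFirstFold k _ _ (PySem.Dict.get?_empty k)

theorem pvBOutEq (all_path : List (List Int)) :
    ∀ (l : List ((Int × Int) × Bool)) (ch : List Int),
      (l.foldl (fun out kv =>
          if kv.2 == false && ((PySem.List.enumerate all_path 0).foldl pvB_firstStep PySem.Dict.empty).contains kv.1
          then out ++ [((PySem.List.enumerate all_path 0).foldl pvB_firstStep PySem.Dict.empty).getD kv.1 0]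
          else out) ch)
        = ch ++ l.flatMap (pvContribB all_path) := by
  intro l
  induction l with
  | nil => intro ch; simp
  | cons kv l ih =>
    intro ch
    have hchar := pvFirstChar all_path kv.1
    simp only [List.foldl_cons, List.flatMap_cons]
    cases hv : kv.2 with
    | true =>
      rw [if_neg (by simp)]
      have hcB : pvContribB all_path kv = [] := by simp [pvContribB, hv]
      rw [hcB, List.nil_append]
      exact ih ch
    | false =>
      cases hfind : pvFind all_path kv.1 with
      | none =>
        have hget : ((PySem.List.enumerate all_path 0).foldl pvB_firstStep PySem.Dict.empty).get? kv.1 = none := by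
          rw [hchar, hfind]; rfl
        have hcont : ((PySem.List.enumerate all_path 0).foldl pvB_firstStep PySem.Dict.empty).contains kv.1 = false := by
          rw [PySem.Dict.contains_eq_isSome_get?, hget]; rfl
        rw [if_neg (by simp [hcont])]
        have hcB : pvContribB all_path kv = [] := by simp [pvContribB, hv, hfind]
        rw [hcB, List.nil_append]
        exact ih ch
      | some ip =>
        have hget : ((PySem.List.enumerate all_path 0).foldl pvB_firstStep PySem.Dict.empty).get? kv.1 = some ip.1 := by
          rw [hchar, hfind]; rfl
        have hcont : ((PySem.List.enumerate all_path 0).foldl pvB_firstStep PySem.Dict.empty).contains kv.1 = true := by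
          rw [PySem.Dict.contains_eq_isSome_get?, hget]; rfl
        have hgetD : ((PySem.List.enumerate all_path 0).foldl pvB_firstStep PySem.Dict.empty).getD kv.1 0 = ip.1 := by
          rw [PySem.Dict.getD_eq_get?_getD, hget]; rfl
        rw [if_pos (by simp [hcont]), hgetD, ih (ch ++ [ip.1])]
        have hcB : pvContribB all_path kv = [ip.1] := by simp [pvContribB, hv, hfind]
        rw [hcB, List.append_assoc]

theorem pvAddIdem (S : List Int) (i : Int) :
    PySem.Set.add (PySem.Set.add S i) i = PySem.Set.add S i := by
  have hm : i ∈ PySem.Set.add S i := (PySem.Set.mem_add S i i).mpr (Or.inr rfl)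
  have hc : (PySem.Set.add S i).contains i = true := List.elem_iff.mpr hm
  unfold PySem.Set.add at hc ⊢
  rw [if_pos hc]

theorem pvAddAll (i : Int) :
    ∀ (bl : List Int) (S : List Int), bl ≠ [] → (∀ x ∈ bl, x = i) →
      List.foldl PySem.Set.add S bl = PySem.Set.add S i := by
  intro bl
  induction bl with
  | nil => intro S h _; exact absurd rfl h
  | cons x bl ih =>
    intro S _ hall
    have hx : x = i := hall x (by simp)
    subst hx
    simp only [List.foldl_cons]
    cases hbl : bl with
    | nil => rfl
    | cons y bl' =>
      rw [← hbl, ih (PySem.Set.add S x) (by rw [hbl]; exact List.cons_ne_nil y bl')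
          (fun z hz => hall z (List.mem_cons_of_mem _ hz))]
      exact pvAddIdem S x

theorem pvSetEq (all_path : List (List Int)) :
    ∀ (l : List ((Int × Int) × Bool)) (S : List Int),
      List.foldl PySem.Set.add S (l.flatMap (pvContribA all_path)) =
        List.foldl PySem.Set.add S (l.flatMap (pvContribB all_path)) := by
  intro l
  induction l with
  | nil => intro S; rfl
  | cons kv l ih =>
    intro S
    simp only [List.flatMap_cons, List.foldl_append]
    have hblk : List.foldl PySem.Set.add S (pvContribA all_path kv) =
        List.foldl PySem.Set.add S (pvContribB all_path kv) := by
      cases hv : kv.2 with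
      | true => simp [pvContribA, pvContribB, hv]
      | false =>
        cases hfind : pvFind all_path kv.1 with
        | none => simp [pvContribA, pvContribB, hv, hfind]
        | some ip =>
          have hpred : ((ip.2.zip ip.2.tail).any (fun e => e == kv.1)) = true := by
            have h := hfind
            unfold pvFind at h
            exact List.find?_some (p := fun ip : Int × List Int => (ip.2.zip ip.2.tail).any (fun e => e == kv.1)) h
          obtain ⟨e, hmem, heq⟩ := List.any_eq_true.mp hpred
          have hfilne : (ip.2.zip ip.2.tail).filter (fun e => e == kv.1) ≠ [] := by
            intro h0
            exact (List.filter_eq_nil_iff.mp h0 e hmem) heq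
          have hcA : pvContribA all_path kv =
              ((ip.2.zip ip.2.tail).filter (fun e => e == kv.1)).map (fun _ => ip.1) := by
            simp [pvContribA, hv, hfind]
          have hcB : pvContribB all_path kv = [ip.1] := by simp [pvContribB, hv, hfind]
          rw [hcA, hcB]
          rw [pvAddAll ip.1 _ S (by simpa using hfilne) (by simp)]
          rfl
    rw [hblk]
    exact ih _

theorem pvMainEq (G : Int) (all_path : List (List Int)) (ch : List Int) (ecm : List (Int × Int × Bool)) :
    auto_add_chosen_path G all_path ch ecm = auto_add_chosen_path_alt G all_path ch ecm := by
  simp only [auto_add_chosen_path, auto_add_chosen_path_alt]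
  have hnd : (pvDecodeMap ecm).keys.Nodup := by
    unfold pvDecodeMap
    exact PySem.Dict.nodup_keys_foldl_insert_key ecm (fun t => (t.1, t.2.1)) (fun d t => t.2.2)
      PySem.Dict.empty PySem.Dict.nodup_keys_empty
  have hkeys : (pvDecodeMap ecm).keys = (pvDecodeMap ecm).items.map Prod.fst := rfl
  have hvals : ∀ kv ∈ (pvDecodeMap ecm).items, (pvDecodeMap ecm).get? kv.1 = some kv.2 := by
    intro kv hkv
    exact PySem.Dict.get?_of_mem_items _ hkv hnd
  have hA := pvKeyFold all_path (pvDecodeMap ecm).items ch (pvDecodeMap ecm)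
    (by rw [← hkeys]; exact hnd) hvals
  have hB := pvBOutEq all_path (pvDecodeMap ecm).items ch
  rw [hkeys, hA, hB]
  rw [PySem.Set.ofList_eq_foldl, PySem.Set.ofList_eq_foldl, List.foldl_append, List.foldl_append]
  exact pvSetEq all_path (pvDecodeMap ecm).items _

-- ===== VERDICT (by name: the statement is the Claim_ definition above) =====
theorem auto_add_chosen_path_spec : Claim_equal_auto_add_chosen_path := by
  intro G all_path chosen_path_idx_list edge_covered_map _
  unfold Spec_auto_add_chosen_path
  exact pvMainEq G all_path chosen_path_idx_list edge_covered_map
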